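-- pv_equiv track=rewrite | github.com/pypi-data/pypi-mirror-400 | packages/chgksuite/chgksuite-0.27.0b5-py3-none-any.whl/chgksuite/composer/lj.py | generate_navigation
-- ===== SOURCE A (Python) =====
-- def generate_navigation(strus):
--     titles = [x[0][0]["header"].split(". ")[-1] for x in strus]
--     urls = [x[1]["url"] for x in strus]
--     result = []
--     for i in range(len(titles)):
--         inner = []
--         for j in range(len(urls)):
--             inner.append(
--                 titles[j]
--                 if j == i
--                 else '<a href="{}">{}</a>'.format(urls[j], titles[j])
--             )
--         result.append(" | ".join(inner))
--     return result
-- ===== SOURCE B (Python) =====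
-- def generate_navigation(strus):
--     titles = [x[0][0]["header"].split(". ")[-1] for x in strus]
--     urls = [x[1]["url"] for x in strus]
--     # prefix pass: prefixes[i] = all links before i, each followed by " | "
--     prefixes = []
--     acc = ""
--     for u, t in zip(urls, titles):
--         prefixes.append(acc)
--         acc = acc + '<a href="{}">{}</a>'.format(u, t) + " | "
--     # suffix pass (right to left): suffixes[i] = all links after i, each preceded by " | "
--     suffixes = []
--     acc = ""
--     for u, t in zip(reversed(urls), reversed(titles)):
--         suffixes.append(acc)
--         acc = " | " + '<a href="{}">{}</a>'.format(u, t) + acc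
--     suffixes.reverse()
--     return [p + t + s for p, t, s in zip(prefixes, titles, suffixes)]
-- ===== Notes on version B (the rewrite author's own statement) =====
-- stated objective: alternative
-- what changed: Instead of rebuilding and re-joining every row with a per-element j==i conditional, B makes one left-to-right pass accumulating prefix strings and one right-to-left pass accumulating suffix strings, then assembles each row as prefixes[i] + titles[i] + suffixes[i] with no per-row join.
import Mathlib
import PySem

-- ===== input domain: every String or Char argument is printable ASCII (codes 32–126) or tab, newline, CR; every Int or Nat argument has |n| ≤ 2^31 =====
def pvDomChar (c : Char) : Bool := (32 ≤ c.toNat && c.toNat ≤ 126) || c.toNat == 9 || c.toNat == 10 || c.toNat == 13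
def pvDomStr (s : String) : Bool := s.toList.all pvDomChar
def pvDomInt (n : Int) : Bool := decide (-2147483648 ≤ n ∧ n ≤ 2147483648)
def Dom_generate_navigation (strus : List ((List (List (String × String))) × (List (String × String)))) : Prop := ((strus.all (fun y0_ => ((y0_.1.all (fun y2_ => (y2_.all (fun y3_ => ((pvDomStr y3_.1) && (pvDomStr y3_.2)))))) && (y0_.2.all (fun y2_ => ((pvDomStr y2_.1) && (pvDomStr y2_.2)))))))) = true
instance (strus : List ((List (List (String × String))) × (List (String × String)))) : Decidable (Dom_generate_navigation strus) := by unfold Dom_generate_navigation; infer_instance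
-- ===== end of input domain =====

-- ===== PORT A =====
-- B replaces the per-row conditional join by a prefix pass and a suffix pass plus a
-- three-piece assembly per row; equivalence proved on inputs where A raises nothing.
-- dict lookup d[k] (first match; Pre_ guarantees the key is present)
def pvLookup (d : List (String × String)) (k : String) : String :=
  ((d.find? (fun p => p.1 == k)).map (·.2)).getD ""

def generate_navigation (strus : List ((List (List (String × String))) × (List (String × String)))) : List String :=
  let titles := strus.map (fun x =>
    (PySem.List.pyGet? (((PySem.Str.split? (pvLookup x.1.headI "header") ". ").getD [])) (-1)).getD "")
  let urls := strus.map (fun x => pvLookup x.2 "url")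
  (PySem.List.pyRange 0 (titles.length : Int) 1).foldl (fun result i =>
    result ++ [PySem.Str.join " | " ((PySem.List.pyRange 0 (urls.length : Int) 1).foldl (fun inner j =>
      inner ++ [if j == i then PySem.List.pyGetD titles j ""
                else "<a href=\"" ++ PySem.List.pyGetD urls j "" ++ "\">" ++ PySem.List.pyGetD titles j "" ++ "</a>"]) [])]) []

-- ===== PORT B =====
def generate_navigation_alt (strus : List ((List (List (String × String))) × (List (String × String)))) : List String :=
  let titles := strus.map (fun x =>
    (PySem.List.pyGet? (((PySem.Str.split? (pvLookup x.1.headI "header") ". ").getD [])) (-1)).getD "")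
  let urls := strus.map (fun x => pvLookup x.2 "url")
  -- prefix pass: prefixes[i] = every link before i, each followed by " | "
  let pr := (urls.zip titles).foldl
      (fun (st : List String × String) ut =>
        (st.1 ++ [st.2], st.2 ++ ("<a href=\"" ++ ut.1 ++ "\">" ++ ut.2 ++ "</a>") ++ " | "))
      ([], "")
  let prefixes := pr.1
  -- suffix pass, right to left: suffixes[i] = every link after i, each preceded by " | "
  let sf := (urls.reverse.zip titles.reverse).foldl
      (fun (st : List String × String) ut =>
        (st.1 ++ [st.2], " | " ++ ("<a href=\"" ++ ut.1 ++ "\">" ++ ut.2 ++ "</a>") ++ st.2))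
      ([], "")
  let suffixes := sf.1.reverse
  (prefixes.zip (titles.zip suffixes)).map (fun p => p.1 ++ p.2.1 ++ p.2.2)

-- ===== PRECONDITION & SPEC =====
-- Pre_ excludes exactly the inputs where A raises: an empty inner list (IndexError on x[0][0])
-- or a first dict without "header" / second dict without "url" (KeyError).
def Pre_generate_navigation (strus : List ((List (List (String × String))) × (List (String × String)))) : Prop :=
  ∀ x ∈ strus, x.1 ≠ [] ∧ (x.1.headI.find? (fun p => p.1 == "header")).isSome
    ∧ (x.2.find? (fun p => p.1 == "url")).isSome
instance (strus : List ((List (List (String × String))) × (List (String × String)))) : Decidable (Pre_generate_navigation strus) := by unfold Pre_generate_navigation; infer_instance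
def pvWitness_generate_navigation : (List ((List (List (String × String))) × (List (String × String)))) :=
  [([[("header", "A. B")]], [("url", "u")])]
def Spec_generate_navigation (strus : List ((List (List (String × String))) × (List (String × String)))) (out : List String) : Prop := out = generate_navigation_alt strus
instance (strus : List ((List (List (String × String))) × (List (String × String)))) (out : List String) : Decidable (Spec_generate_navigation strus out) := by unfold Spec_generate_navigation; infer_instance

-- ===== CLAIM (what is proved, stated in full; the proofs are below) =====
def Claim_equal_generate_navigation : Prop := ∀ (strus : List ((List (List (String × String))) × (List (String × String)))), Dom_generate_navigation strus → Pre_generate_navigation strus → Spec_generate_navigation strus (generate_navigation strus)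

-- ===== LEMMAS AND PROOFS =====

-- the link string for a (url, title) pair
def pvLk (ut : String × String) : String := "<a href=\"" ++ ut.1 ++ "\">" ++ ut.2 ++ "</a>"

-- the list of states of B's prefix pass / suffix pass
def pvP : List String → String → List String
  | [], _ => []
  | l :: ls, s => s :: pvP ls (s ++ l ++ " | ")

def pvQ : List String → String → List String
  | [], _ => []
  | l :: ls, s => s :: pvQ ls (" | " ++ l ++ s)

-- closed forms of the accumulated pieces
def pvPre : List String → String
  | [] => ""
  | l :: ls => l ++ " | " ++ pvPre ls

def pvSuf : List String → String
  | [] => ""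
  | l :: ls => " | " ++ l ++ pvSuf ls

def pvRv : List String → String
  | [] => ""
  | l :: ls => pvRv ls ++ (" | " ++ l)

theorem pv_foldP (zs : List (String × String)) (acc : List String) (s : String) :
    ((zs.foldl (fun (st : List String × String) ut =>
      (st.1 ++ [st.2], st.2 ++ ("<a href=\"" ++ ut.1 ++ "\">" ++ ut.2 ++ "</a>") ++ " | ")) (acc, s)).1)
    = acc ++ pvP (zs.map pvLk) s := by
  induction zs generalizing acc s with
  | nil => simp [pvP]
  | cons z zs ih => simp [pvP, pvLk, ih]

theorem pv_foldQ (zs : List (String × String)) (acc : List String) (s : String) :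
    ((zs.foldl (fun (st : List String × String) ut =>
      (st.1 ++ [st.2], " | " ++ ("<a href=\"" ++ ut.1 ++ "\">" ++ ut.2 ++ "</a>") ++ st.2)) (acc, s)).1)
    = acc ++ pvQ (zs.map pvLk) s := by
  induction zs generalizing acc s with
  | nil => simp [pvQ]
  | cons z zs ih => simp [pvQ, pvLk, ih]

theorem pv_length_pvP (ls : List String) (s : String) : (pvP ls s).length = ls.length := by
  induction ls generalizing s with
  | nil => simp [pvP]
  | cons l ls ih => simp [pvP, ih]

theorem pv_length_pvQ (ls : List String) (s : String) : (pvQ ls s).length = ls.length := by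
  induction ls generalizing s with
  | nil => simp [pvQ]
  | cons l ls ih => simp [pvQ, ih]

theorem pv_getElem_pvP (ls : List String) (s : String) (i : Nat) (h : i < ls.length) :
    (pvP ls s)[i]'(by rw [pv_length_pvP]; exact h) = s ++ pvPre (ls.take i) := by
  induction ls generalizing s i with
  | nil => simp at h
  | cons l ls ih =>
    cases i with
    | zero => simp [pvP, pvPre]
    | succ i =>
      have h' : i < ls.length := by simpa using h
      simp only [pvP, List.getElem_cons_succ, List.take_succ_cons, pvPre]
      rw [ih _ _ h']
      simp [String.append_assoc]

theorem pv_getElem_pvQ (ls : List String) (s : String) (i : Nat) (h : i < ls.length) :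
    (pvQ ls s)[i]'(by rw [pv_length_pvQ]; exact h) = pvRv (ls.take i) ++ s := by
  induction ls generalizing s i with
  | nil => simp at h
  | cons l ls ih =>
    cases i with
    | zero => simp [pvQ, pvRv]
    | succ i =>
      have h' : i < ls.length := by simpa using h
      simp only [pvQ, List.getElem_cons_succ, List.take_succ_cons, pvRv]
      rw [ih _ _ h']
      simp [String.append_assoc]

theorem pv_pvSuf_append_singleton (bs : List String) (l : String) :
    pvSuf (bs ++ [l]) = pvSuf bs ++ (" | " ++ l) := by
  induction bs with
  | nil => simp [pvSuf]
  | cons b bs ih => simp [pvSuf, ih, String.append_assoc]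

theorem pv_pvRv_eq (as : List String) : pvRv as = pvSuf as.reverse := by
  induction as with
  | nil => simp [pvRv, pvSuf]
  | cons a as ih => simp [pvRv, ih, pv_pvSuf_append_singleton]

theorem pv_str_join_cons (sep x y : String) (r : List String) :
    PySem.Str.join sep (x :: y :: r) = x ++ sep ++ PySem.Str.join sep (y :: r) := by
  apply String.toList_inj.mp
  simp [PySem.Str.toList_join, PySem.Chars.join_cons_cons, String.toList_append]

theorem pv_str_join_singleton (sep x : String) : PySem.Str.join sep [x] = x := by
  apply String.toList_inj.mp
  simp [PySem.Str.toList_join, PySem.Chars.join_singleton]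

theorem pv_join_cons_suf (ds : List String) (t : String) :
    PySem.Str.join " | " (t :: ds) = t ++ pvSuf ds := by
  induction ds generalizing t with
  | nil => simp [pv_str_join_singleton, pvSuf]
  | cons d ds ih => rw [pv_str_join_cons, ih]; simp [pvSuf, String.append_assoc]

theorem pv_join_split (as : List String) (t : String) (ds : List String) :
    PySem.Str.join " | " (as ++ t :: ds) = pvPre as ++ (t ++ pvSuf ds) := by
  induction as with
  | nil => simp [pv_join_cons_suf, pvPre, String.empty_append]
  | cons a as ih =>
    have : as ++ t :: ds = (as ++ t :: ds).headI :: (as ++ t :: ds).tail := by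
      cases as <;> simp
    rw [List.cons_append, this, pv_str_join_cons, ← this, ih]
    simp [pvPre, String.append_assoc]

-- the inner loop of A builds exactly the link row with entry k unlinked
theorem pv_inner_eq (titles urls : List String) (h : urls.length = titles.length)
    (k : Nat) (hk : k < titles.length) :
    (PySem.List.pyRange 0 (urls.length : Int) 1).foldl (fun inner j =>
      inner ++ [if j == (k : Int) then PySem.List.pyGetD titles j ""
                else "<a href=\"" ++ PySem.List.pyGetD urls j "" ++ "\">" ++ PySem.List.pyGetD titles j "" ++ "</a>"]) []
    = ((urls.zip titles).map pvLk).set k (titles[k]) := by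
  rw [PySem.List.foldl_append_singleton_eq_map]
  apply List.ext_getElem
  · simp [PySem.List.length_pyRange_one, List.length_zip, h]
  · intro m h1 h2
    simp only [List.nil_append, List.getElem_map, PySem.List.getElem_pyRange_one, zero_add]
    have hm : m < titles.length := by
      simpa [PySem.List.length_pyRange_one, h] using h1
    rw [List.getElem_set]
    have hmu : m < urls.length := by omega
    have hz : m < (urls.zip titles).length := by simp [List.length_zip]; omega
    simp only [List.getElem_map, List.getElem_zip, pvLk]
    have ht : PySem.List.pyGetD titles (m : Int) "" = titles[m] := by
      simp [PySem.List.pyGetD_natCast, List.getD_eq_getElem?_getD, List.getElem?_eq_getElem hm]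
    have hu : PySem.List.pyGetD urls (m : Int) "" = urls[m] := by
      simp [PySem.List.pyGetD_natCast, List.getD_eq_getElem?_getD, List.getElem?_eq_getElem hmu]
    by_cases hmk : m = k
    · subst hmk; simp [ht]
    · have : ((m : Int) == (k : Int)) = false := by simp; omega
      simp [this, ht, hu]
      exact fun hkm => absurd hkm.symm hmk

theorem pv_suffix_getElem (ls : List String) (k : Nat) (hk : k < ls.length) :
    (pvQ ls.reverse "").reverse[k]'(by simp [pv_length_pvQ]; exact hk) = pvSuf (ls.drop (k+1)) := by
  rw [List.getElem_reverse]
  have hj : (pvQ ls.reverse "").length - 1 - k < ls.reverse.length := by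
    simp only [pv_length_pvQ, List.length_reverse]; omega
  rw [pv_getElem_pvQ ls.reverse "" _ hj]
  rw [List.take_reverse, pv_pvRv_eq, List.reverse_reverse]
  have hj2 : ls.length - ((pvQ ls.reverse "").length - 1 - k) = k + 1 := by
    simp only [pv_length_pvQ, List.length_reverse]; omega
  rw [hj2, String.append_empty]

theorem pv_zip_reverse {α β : Type} (a : List α) (b : List β) (h : a.length = b.length) :
    a.reverse.zip b.reverse = (a.zip b).reverse := by
  apply List.ext_getElem
  · simp [List.length_zip, h]
  · intro i h1 h2
    have hi : i < a.length := by simp [List.length_zip, h] at h1; omega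
    rw [List.getElem_reverse]
    simp only [List.getElem_zip]
    rw [List.getElem_reverse, List.getElem_reverse]
    simp [List.length_zip, h]

-- ===== VERDICT (by name: the statement is the Claim_ definition above) =====
theorem generate_navigation_spec : Claim_equal_generate_navigation := by
  intro strus _ _
  unfold Spec_generate_navigation generate_navigation generate_navigation_alt
  simp only []
  set titles := strus.map (fun x =>
    (PySem.List.pyGet? (((PySem.Str.split? (pvLookup x.1.headI "header") ". ").getD [])) (-1)).getD "") with htitles
  set urls := strus.map (fun x => pvLookup x.2 "url") with hurls
  have hlen : urls.length = titles.length := by simp [htitles, hurls]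
  have hll : ((urls.zip titles).map pvLk).length = titles.length := by
    simp [List.length_zip, hlen]
  rw [PySem.List.foldl_append_singleton_eq_map, pv_foldP, pv_foldQ,
      pv_zip_reverse _ _ hlen, List.map_reverse]
  apply List.ext_getElem
  · simp [PySem.List.length_pyRange_one, List.length_zip, pv_length_pvP, pv_length_pvQ, hlen]
  · intro k h1 h2
    have hk : k < titles.length := by
      simpa [PySem.List.length_pyRange_one] using h1
    have hkl : k < ((urls.zip titles).map pvLk).length := by omega
    simp only [List.nil_append, List.getElem_map, PySem.List.getElem_pyRange_one, zero_add,
      List.getElem_zip]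
    rw [pv_inner_eq titles urls hlen k hk]
    rw [List.set_eq_take_append_cons_drop, if_pos hkl, pv_join_split]
    rw [pv_getElem_pvP _ "" k hkl, pv_suffix_getElem _ k hkl]
    simp [String.empty_append, String.append_assoc]
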